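-- pv_equiv track=rewrite | github.com/kaikok/trello-automator | daily_task.py | create_card_action_list_lookup
-- ===== SOURCE A (Python) =====
-- def create_card_action_list_lookup(action_list):
--     card_action_list_lookup = {}
--     for action in action_list:
--         if action["data"].get("card"):
--             card_id = action["data"]["card"]["id"]
--             if card_action_list_lookup.get(card_id):
--                 card_action_list_lookup[card_id].append(action)
--             else:
--                 card_action_list_lookup[card_id] = [action]
--     return card_action_list_lookup
-- ===== SOURCE B (Python) =====
-- def create_card_action_list_lookup(action_list):
--     def card_id_of(action):
--         card = action["data"].get("card")
--         return card["id"] if card else None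
--
--     keyed = [(card_id_of(action), action) for action in action_list]
--     order = []
--     for key, _ in keyed:
--         if key is not None and key not in order:
--             order.append(key)
--     return {key: [a for k, a in keyed if k == key] for key in order}
-- ===== Notes on version B (the rewrite author's own statement) =====
-- stated objective: alternative
-- what changed: Replaces the incremental dict upsert (get-then-append-or-create per action) with a three-phase pipeline: compute each action's card id once, collect the distinct ids in first-occurrence order, then build each group by a filter over the keyed list.
import Mathlib
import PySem

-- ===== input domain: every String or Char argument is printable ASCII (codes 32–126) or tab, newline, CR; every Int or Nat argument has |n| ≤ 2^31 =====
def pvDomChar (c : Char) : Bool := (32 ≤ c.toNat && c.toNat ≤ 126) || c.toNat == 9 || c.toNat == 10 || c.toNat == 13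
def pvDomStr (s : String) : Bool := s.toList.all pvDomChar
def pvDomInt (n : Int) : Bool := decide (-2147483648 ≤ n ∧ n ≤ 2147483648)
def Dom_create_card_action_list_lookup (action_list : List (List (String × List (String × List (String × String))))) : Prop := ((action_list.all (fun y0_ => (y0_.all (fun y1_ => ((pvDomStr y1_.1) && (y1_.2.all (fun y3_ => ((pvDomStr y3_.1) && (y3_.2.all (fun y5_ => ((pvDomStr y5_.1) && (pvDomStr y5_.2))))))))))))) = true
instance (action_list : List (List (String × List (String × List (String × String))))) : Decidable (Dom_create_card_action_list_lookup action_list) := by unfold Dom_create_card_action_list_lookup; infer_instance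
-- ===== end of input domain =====

-- B computes each action's card id once, collects distinct ids in first-occurrence order,
-- then builds each group by filtering; A upserts into a dict incrementally. Alternative
-- decomposition, not faster.

-- ===== PORT A =====
def pvStepA (lookup : PySem.Dict String (List (List (String × List (String × List (String × String)))))) (action : List (String × List (String × List (String × String)))) : PySem.Dict String (List (List (String × List (String × List (String × String))))) :=
  match PySem.Dict.get? (PySem.Dict.mk action) "data" with
  | none => lookup          -- action["data"]: KeyError, excluded by Pre_
  | some data =>
    match PySem.Dict.get? (PySem.Dict.mk data) "card" with
    | none => lookup        -- .get("card") is None: falsy, skip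
    | some card =>
      if card = [] then lookup   -- empty card dict: falsy, skip
      else
        match PySem.Dict.get? (PySem.Dict.mk card) "id" with
        | none => lookup    -- card["id"]: KeyError, excluded by Pre_
        | some card_id =>
          match PySem.Dict.get? lookup card_id with
          | some cur =>
            if cur ≠ [] then PySem.Dict.insert lookup card_id (cur ++ [action])
            else PySem.Dict.insert lookup card_id [action]
          | none => PySem.Dict.insert lookup card_id [action]

def create_card_action_list_lookup (action_list : List (List (String × List (String × List (String × String))))) : List (String × List (List (String × List (String × List (String × String))))) :=
  (action_list.foldl pvStepA PySem.Dict.empty).items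

-- ===== PORT B =====
def pvCardIdOf (action : List (String × List (String × List (String × String)))) : Option String :=
  match PySem.Dict.get? (PySem.Dict.mk action) "data" with
  | none => none               -- action["data"]: KeyError, excluded by Pre_
  | some data =>
    match PySem.Dict.get? (PySem.Dict.mk data) "card" with
    | none => none
    | some card =>
      if card ≠ [] then PySem.Dict.get? (PySem.Dict.mk card) "id"  -- none = KeyError, excluded by Pre_
      else none

def create_card_action_list_lookup_alt (action_list : List (List (String × List (String × List (String × String))))) : List (String × List (List (String × List (String × List (String × String))))) :=
  let keyed := action_list.map (fun a => (pvCardIdOf a, a))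
  let order := keyed.foldl
    (fun order p =>
      match p.1 with
      | some k => if k ∈ order then order else order ++ [k]
      | none => order) []
  order.map (fun key => (key, (keyed.filter (fun p => p.1 == some key)).map (fun p => p.2)))

-- ===== PRECONDITION & SPEC =====
-- Pre_ excludes exactly the inputs where Python A raises KeyError: an action without a
-- "data" key, or a non-empty card dict without an "id" key (B raises there too).
def Pre_create_card_action_list_lookup (action_list : List (List (String × List (String × List (String × String))))) : Prop :=
  ∀ a ∈ action_list,
    (PySem.Dict.get? (PySem.Dict.mk a) "data").isSome = true ∧
    (let data := (PySem.Dict.get? (PySem.Dict.mk a) "data").getD []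
     let card := (PySem.Dict.get? (PySem.Dict.mk data) "card").getD []
     card = [] ∨ (PySem.Dict.get? (PySem.Dict.mk card) "id").isSome = true)
instance (action_list : List (List (String × List (String × List (String × String))))) : Decidable (Pre_create_card_action_list_lookup action_list) := by unfold Pre_create_card_action_list_lookup; infer_instance
def pvWitness_create_card_action_list_lookup : (List (List (String × List (String × List (String × String))))) :=
  [[("data", [("card", [("id", "c1")])])], [("data", [])], [("data", [("card", [("id", "c1")])])]]

def Spec_create_card_action_list_lookup (action_list : List (List (String × List (String × List (String × String))))) (out : List (String × List (List (String × List (String × List (String × String)))))) : Prop := out = create_card_action_list_lookup_alt action_list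
-- instance search for DecidableEq of the deeply nested output type exceeds the default
-- search size, so the (standard) instance term is spelled out.
def pvDecEqAct : DecidableEq (List (String × List (String × List (String × String)))) :=
  @instDecidableEqList _ inferInstance
def pvDecEqOut : DecidableEq (List (String × List (List (String × List (String × List (String × String)))))) :=
  @instDecidableEqList _ (@instDecidableEqProd _ _ inferInstance (@instDecidableEqList _ pvDecEqAct))
instance (action_list : List (List (String × List (String × List (String × String))))) (out : List (String × List (List (String × List (String × List (String × String)))))) : Decidable (Spec_create_card_action_list_lookup action_list out) := by unfold Spec_create_card_action_list_lookup; exact pvDecEqOut out _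

-- ===== CLAIM (what is proved, stated in full; the proofs are below) =====
def Claim_equal_create_card_action_list_lookup : Prop := ∀ (action_list : List (List (String × List (String × List (String × String))))), Dom_create_card_action_list_lookup action_list → Pre_create_card_action_list_lookup action_list → Spec_create_card_action_list_lookup action_list (create_card_action_list_lookup action_list)

-- ===== LEMMAS AND PROOFS =====
abbrev pvAct : Type := List (String × List (String × List (String × String)))

-- the (card id, action) pairs of the actions that have a card id
def pvKeyed (xs : List pvAct) : List (String × pvAct) :=
  xs.filterMap (fun a => (pvCardIdOf a).map (fun k => (k, a)))

lemma pvStepA_eq (d : PySem.Dict String (List pvAct)) (a : pvAct) :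
    pvStepA d a =
      match pvCardIdOf a with
      | none => d
      | some k => d.modify k [] (fun x => x ++ [a]) := by
  unfold pvStepA pvCardIdOf
  rcases h1 : PySem.Dict.get? (PySem.Dict.mk a) "data" with _ | data
  · simp
  rcases h2 : PySem.Dict.get? (PySem.Dict.mk data) "card" with _ | card
  · simp [h2]
  by_cases hc : card = []
  · simp [h2, hc]
  rcases h3 : PySem.Dict.get? (PySem.Dict.mk card) "id" with _ | k
  · simp [h2, h3, hc]
  rcases h4 : PySem.Dict.get? d k with _ | cur
  · simp [h2, h3, h4, hc, PySem.Dict.modify, PySem.Dict.getD_eq_get?_getD]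
  by_cases hcur : cur = [] <;>
    simp [h2, h3, h4, hc, hcur, PySem.Dict.modify, PySem.Dict.getD_eq_get?_getD]

lemma pvFoldA_eq (xs : List pvAct) (d : PySem.Dict String (List pvAct)) :
    xs.foldl pvStepA d =
      (pvKeyed xs).foldl (fun d p => d.modify p.1 [] (fun x => x ++ [p.2])) d := by
  induction xs generalizing d with
  | nil => rfl
  | cons a xs ih =>
    simp only [List.foldl_cons, pvKeyed, List.filterMap_cons]
    cases h : pvCardIdOf a with
    | none => simpa [pvStepA_eq, h, pvKeyed] using ih d
    | some k => simpa [pvStepA_eq, h, pvKeyed] using ih (d.modify k [] (fun x => x ++ [a]))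

lemma pvKeyed_map_fst (xs : List pvAct) :
    (pvKeyed xs).map (fun p => p.1) = xs.filterMap pvCardIdOf := by
  induction xs with
  | nil => rfl
  | cons a xs ih =>
    simp only [pvKeyed, List.filterMap_cons] at *
    cases h : pvCardIdOf a <;> simp [ih]

lemma pvOrder_eq (xs : List pvAct) (acc : List String) :
    (xs.map (fun a => (pvCardIdOf a, a))).foldl
      (fun order p =>
        match p.1 with
        | some k => if k ∈ order then order else order ++ [k]
        | none => order) acc
    = PySem.Set.update acc (xs.filterMap pvCardIdOf) := by
  induction xs generalizing acc with
  | nil => rfl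
  | cons a xs ih =>
    simp only [List.map_cons, List.foldl_cons, List.filterMap_cons]
    cases h : pvCardIdOf a with
    | none => simpa [h] using ih acc
    | some k =>
      rw [PySem.Set.update_cons]
      have hadd : (if k ∈ acc then acc else acc ++ [k]) = PySem.Set.add acc k :=
        (PySem.Set.add_eq_ite acc k).symm
      simpa [hadd] using ih (PySem.Set.add acc k)

lemma pvGroup_eq (xs : List pvAct) (k : String) :
    ((xs.map (fun a => (pvCardIdOf a, a))).filter (fun p => p.1 == some k)).map (fun p => p.2)
    = ((pvKeyed xs).filter (fun p => p.1 == k)).map (fun p => p.2) := by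
  induction xs with
  | nil => rfl
  | cons a xs ih =>
    simp only [List.map_cons, List.filter_cons, pvKeyed, List.filterMap_cons] at *
    cases h : pvCardIdOf a with
    | none => simpa [h] using ih
    | some k' =>
      by_cases hk : k' = k <;> simp [hk, ih]

lemma pvAlt_eq (xs : List pvAct) :
    create_card_action_list_lookup_alt xs
      = (PySem.Set.ofList (xs.filterMap pvCardIdOf)).map
          (fun k => (k, ((pvKeyed xs).filter (fun p => p.1 == k)).map (fun p => p.2))) := by
  unfold create_card_action_list_lookup_alt
  simp only [pvOrder_eq, PySem.Set.update_nil_left]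
  exact List.map_congr_left (fun k _ => by rw [pvGroup_eq])

-- ===== VERDICT (by name: the statement is the Claim_ definition above) =====
theorem create_card_action_list_lookup_spec : Claim_equal_create_card_action_list_lookup := by
  intro xs _ _
  unfold Spec_create_card_action_list_lookup create_card_action_list_lookup
  rw [pvFoldA_eq, pvAlt_eq]
  have hnd : ((pvKeyed xs).foldl
      (fun d p => d.modify p.1 [] (fun x => x ++ [p.2])) PySem.Dict.empty).keys.Nodup := by
    simpa using PySem.Dict.nodup_keys_foldl_modify_key (pvKeyed xs) (fun p => p.1) []
      (fun _ p x => x ++ [p.2]) PySem.Dict.empty (by simp)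
  rw [PySem.Dict.items_eq_map_keys _ hnd []]
  have hkeys : ((pvKeyed xs).foldl
      (fun d p => d.modify p.1 [] (fun x => x ++ [p.2])) PySem.Dict.empty).keys
      = PySem.Set.ofList (xs.filterMap pvCardIdOf) := by
    simpa [PySem.Set.update_nil_left, pvKeyed_map_fst] using
      PySem.Dict.keys_foldl_modify_key (pvKeyed xs) (fun p => p.1) []
        (fun _ p x => x ++ [p.2]) PySem.Dict.empty
  rw [hkeys]
  refine List.map_congr_left (fun k _ => ?_)
  have hg := PySem.Dict.getD_foldl_modify_append (pvKeyed xs) PySem.Dict.empty k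
  simp only [PySem.Dict.getD_empty, List.nil_append] at hg
  rw [hg]
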